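-- pv_equiv track=rewrite | github.com/rjav1/battlecode | research/analyze_maps.py | find_chokepoints
-- ===== SOURCE A (Python) =====
-- def find_chokepoints(grid, w, h):
--     """Count narrow (1-2 cell wide) passages between wall segments."""
--     choke_count = 0
--     # Check rows
--     for y in range(h):
--         in_gap = False
--         gap_width = 0
--         had_wall_before = False
--         for x in range(w):
--             if grid[y][x] != 1:
--                 if not in_gap:
--                     in_gap = True
--                     gap_width = 1
--                 else:
--                     gap_width += 1
--             else:
--                 if in_gap and gap_width <= 2 and had_wall_before:
--                     choke_count += 1
--                 in_gap = False
--                 gap_width = 0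
--                 had_wall_before = True
--     # Check columns
--     for x in range(w):
--         in_gap = False
--         gap_width = 0
--         had_wall_before = False
--         for y in range(h):
--             if grid[y][x] != 1:
--                 if not in_gap:
--                     in_gap = True
--                     gap_width = 1
--                 else:
--                     gap_width += 1
--             else:
--                 if in_gap and gap_width <= 2 and had_wall_before:
--                     choke_count += 1
--                 in_gap = False
--                 gap_width = 0
--                 had_wall_before = True
--     return choke_count
-- ===== SOURCE B (Python) =====
-- def _line_chokes(line):
--     """Count gaps of 1-2 non-wall cells strictly between two walls in one line."""
--     walls = [i for i, v in enumerate(line) if v == 1]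
--     return sum(1 for i, j in zip(walls, walls[1:]) if 1 <= j - i - 1 <= 2)
--
--
-- def find_chokepoints(grid, w, h):
--     """Count narrow (1-2 cell wide) passages between wall segments."""
--     total = 0
--     for y in range(h):
--         total += _line_chokes([grid[y][x] for x in range(w)])
--     for x in range(w):
--         total += _line_chokes([grid[y][x] for y in range(h)])
--     return total
-- ===== Notes on version B (the rewrite author's own statement) =====
-- stated objective: simpler
-- what changed: Replaces the four-variable state machine (in_gap/gap_width/had_wall_before) with a helper that collects wall indices per line and counts consecutive index pairs whose gap is 1-2 cells, applied once per row and once per column.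
import Mathlib
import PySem

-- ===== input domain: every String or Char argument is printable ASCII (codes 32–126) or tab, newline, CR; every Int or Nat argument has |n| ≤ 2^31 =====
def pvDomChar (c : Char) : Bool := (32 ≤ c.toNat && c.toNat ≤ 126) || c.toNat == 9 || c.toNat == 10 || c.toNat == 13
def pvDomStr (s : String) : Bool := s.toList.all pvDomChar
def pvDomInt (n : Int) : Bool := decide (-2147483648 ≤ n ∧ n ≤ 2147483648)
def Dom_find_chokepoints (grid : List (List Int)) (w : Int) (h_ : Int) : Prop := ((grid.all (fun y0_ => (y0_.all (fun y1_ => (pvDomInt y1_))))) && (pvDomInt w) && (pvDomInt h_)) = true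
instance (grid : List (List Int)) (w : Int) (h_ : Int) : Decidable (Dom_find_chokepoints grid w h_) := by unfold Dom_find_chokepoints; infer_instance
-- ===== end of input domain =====

-- B replaces A's per-line four-variable state machine with a wall-index/pair-gap helper; objective: simpler.


-- ===== PORT A =====
-- state: (choke_count, in_gap, gap_width, had_wall_before)
def pvStepA (st : Int × Bool × Int × Bool) (v : Int) : Int × Bool × Int × Bool :=
  let (c, in_gap, gap_width, had_wall) := st
  if v ≠ 1 then
    if ¬ in_gap then (c, true, 1, had_wall)
    else (c, in_gap, gap_width + 1, had_wall)
  else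
    ((if in_gap ∧ gap_width ≤ 2 ∧ had_wall then c + 1 else c), false, 0, true)

-- grid[y][x] is in range on every admitted input (Pre_); pyGetD is exact there
def find_chokepoints (grid : List (List Int)) (w : Int) (h_ : Int) : Int :=
  (PySem.List.pyRange 0 w 1).foldl (fun c x =>
      ((PySem.List.pyRange 0 h_ 1).foldl (fun st y =>
          pvStepA st (PySem.List.pyGetD (PySem.List.pyGetD grid y []) x 0)) (c, false, 0, false)).1)
    ((PySem.List.pyRange 0 h_ 1).foldl (fun c y =>
      ((PySem.List.pyRange 0 w 1).foldl (fun st x =>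
          pvStepA st (PySem.List.pyGetD (PySem.List.pyGetD grid y []) x 0)) (c, false, 0, false)).1) 0)

-- ===== PORT B =====
-- walls = [i for i, v in enumerate(line) if v == 1]; count adjacent pairs with gap 1-2
def pvLineChokes (line : List Int) : Int :=
  let walls := ((PySem.List.enumerate line 0).filter (fun p => p.2 == 1)).map Prod.fst
  ((walls.zip walls.tail).countP (fun p => 1 ≤ p.2 - p.1 - 1 && p.2 - p.1 - 1 ≤ 2) : Int)

def find_chokepoints_alt (grid : List (List Int)) (w : Int) (h_ : Int) : Int :=
  (PySem.List.pyRange 0 w 1).foldl (fun t x =>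
      t + pvLineChokes ((PySem.List.pyRange 0 h_ 1).map (fun y =>
          PySem.List.pyGetD (PySem.List.pyGetD grid y []) x 0)))
    ((PySem.List.pyRange 0 h_ 1).foldl (fun t y =>
      t + pvLineChokes ((PySem.List.pyRange 0 w 1).map (fun x =>
          PySem.List.pyGetD (PySem.List.pyGetD grid y []) x 0))) 0)

-- ===== PRECONDITION & SPEC =====
-- Pre_ excludes exactly the inputs where Python A raises IndexError: when both loop
-- bounds are positive, the first h_ rows must exist and each be at least w wide.
def Pre_find_chokepoints (grid : List (List Int)) (w : Int) (h_ : Int) : Prop :=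
  (0 < w ∧ 0 < h_) → (h_ ≤ grid.length ∧ ∀ row ∈ grid.take h_.toNat, w ≤ row.length)
instance (grid : List (List Int)) (w : Int) (h_ : Int) : Decidable (Pre_find_chokepoints grid w h_) := by unfold Pre_find_chokepoints; infer_instance

def pvWitness_find_chokepoints : List (List Int) × Int × Int := ([[1, 0, 1], [0, 0, 1]], 3, 2)

def Spec_find_chokepoints (grid : List (List Int)) (w : Int) (h_ : Int) (out : Int) : Prop := out = find_chokepoints_alt grid w h_
instance (grid : List (List Int)) (w : Int) (h_ : Int) (out : Int) : Decidable (Spec_find_chokepoints grid w h_ out) := by unfold Spec_find_chokepoints; infer_instance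

-- ===== CLAIM (what is proved, stated in full; the proofs are below) =====
def Claim_equal_find_chokepoints : Prop := ∀ (grid : List (List Int)) (w : Int) (h_ : Int), Dom_find_chokepoints grid w h_ → Pre_find_chokepoints grid w h_ → Spec_find_chokepoints grid w h_ (find_chokepoints grid w h_)

-- ===== LEMMAS AND PROOFS =====

-- recursive restatement of A's per-line state machine (g = current gap length, hw = wall seen)
def pvSM (g : Int) (hw : Bool) : List Int → Int
  | [] => 0
  | v :: t => if v ≠ 1 then pvSM (g + 1) hw t
              else (if 0 < g ∧ g ≤ 2 ∧ hw = true then 1 else 0) + pvSM 0 true t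

-- wall indices of a line, starting at offset k
def pvW (k : Int) : List Int → List Int
  | [] => []
  | v :: t => if v = 1 then k :: pvW (k + 1) t else pvW (k + 1) t

def pvPC (ws : List Int) : Int :=
  ((ws.zip ws.tail).countP (fun p => 1 ≤ p.2 - p.1 - 1 && p.2 - p.1 - 1 ≤ 2) : Int)

theorem pvSM_wall (g : Int) (hw : Bool) (t : List Int) :
    pvSM g hw (1 :: t) = (if 0 < g ∧ g ≤ 2 ∧ hw = true then 1 else 0) + pvSM 0 true t := by
  simp [pvSM]

theorem pvSM_non (g : Int) (hw : Bool) (v : Int) (t : List Int) (hv : v ≠ 1) :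
    pvSM g hw (v :: t) = pvSM (g + 1) hw t := by
  simp [pvSM, hv]

theorem pvW_wall (k : Int) (t : List Int) : pvW k (1 :: t) = k :: pvW (k + 1) t := by
  simp [pvW]

theorem pvW_non (k v : Int) (t : List Int) (hv : v ≠ 1) : pvW k (v :: t) = pvW (k + 1) t := by
  simp [pvW, hv]

theorem pvPC_nil : pvPC [] = 0 := rfl
theorem pvPC_single (a : Int) : pvPC [a] = 0 := rfl

theorem pvPC_cons2 (a b : Int) (t : List Int) :
    pvPC (a :: b :: t) = (if 0 < b - a - 1 ∧ b - a - 1 ≤ 2 then 1 else 0) + pvPC (b :: t) := by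
  show ((List.countP _ ((a, b) :: (b :: t).zip t) : Nat) : Int) = _
  rw [List.countP_cons]
  push_cast
  simp [pvPC]
  ring

theorem pvWalls_eq (line : List Int) (k : Int) :
    ((PySem.List.enumerate line k).filter (fun p => p.2 == 1)).map Prod.fst = pvW k line := by
  induction line generalizing k with
  | nil => rfl
  | cons v t ih =>
      simp only [PySem.List.enumerate_cons, List.filter_cons, pvW]
      by_cases hv : v = 1 <;> simp [hv, ih]

theorem pvL2 (line : List Int) (k i : Int) (hik : i < k) :
    pvPC (i :: pvW k line) = pvSM (k - i - 1) true line := by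
  induction line generalizing k i with
  | nil => simp [pvW, pvSM, pvPC_single]
  | cons v t ih =>
      by_cases hv : v = 1
      · subst hv
        rw [pvW_wall, pvSM_wall, pvPC_cons2, ih (k + 1) k (by omega)]
        have h0 : k + 1 - k - 1 = 0 := by ring
        rw [h0]
        simp
      · rw [pvW_non k v t hv, pvSM_non _ _ _ _ hv, ih (k + 1) i (by omega)]
        congr 1; ring

theorem pvL2' (line : List Int) (k : Int) (g : Int) :
    pvPC (pvW k line) = pvSM g false line := by
  induction line generalizing k g with
  | nil => simp [pvW, pvSM, pvPC_nil]
  | cons v t ih =>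
      by_cases hv : v = 1
      · subst hv
        rw [pvW_wall, pvSM_wall, pvL2 t (k + 1) k (by omega)]
        have h0 : k + 1 - k - 1 = 0 := by ring
        rw [h0]
        simp
      · rw [pvW_non k v t hv, pvSM_non _ _ _ _ hv]
        exact ih (k + 1) (g + 1)

theorem pvLineChokes_eq_SM (line : List Int) : pvLineChokes line = pvSM 0 false line := by
  rw [pvLineChokes]
  show pvPC (((PySem.List.enumerate line 0).filter (fun p => p.2 == 1)).map Prod.fst) = _
  rw [pvWalls_eq, pvL2' line 0 0]

theorem pvStepA_wall (c g : Int) (hw : Bool) :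
    pvStepA (c, decide (0 < g), g, hw) 1
      = ((if 0 < g ∧ g ≤ 2 ∧ hw = true then c + 1 else c), false, 0, true) := by
  simp [pvStepA]

theorem pvStepA_nonwall (c g : Int) (hw : Bool) (v : Int) (hv : v ≠ 1) (hg : 0 ≤ g) :
    pvStepA (c, decide (0 < g), g, hw) v = (c, decide (0 < g + 1), g + 1, hw) := by
  by_cases hgz : 0 < g
  · simp [pvStepA, hv, hgz, show (0:Int) < g + 1 by omega]
  · have hg0 : g = 0 := by omega
    subst hg0; simp [pvStepA, hv]

theorem pvFoldA (line : List Int) (c g : Int) (hw : Bool) (hg : 0 ≤ g) :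
    (line.foldl pvStepA (c, decide (0 < g), g, hw)).1 = c + pvSM g hw line := by
  induction line generalizing c g hw with
  | nil => simp [pvSM]
  | cons v t ih =>
      by_cases hv : v = 1
      · subst hv
        rw [List.foldl_cons, pvStepA_wall]
        have h0 : (false : Bool) = decide ((0:Int) < 0) := by simp
        rw [h0, ih _ 0 true (le_refl 0), pvSM_wall]
        split_ifs <;> ring
      · rw [List.foldl_cons, pvStepA_nonwall c g hw v hv hg, ih c (g + 1) hw (by omega),
            pvSM_non _ _ _ _ hv]

theorem pvInnerA (cells : List Int) (c : Int) :
    (cells.foldl pvStepA (c, false, 0, false)).1 = c + pvSM 0 false cells := by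
  have h := pvFoldA cells c 0 false (le_refl 0)
  simpa using h

theorem pvKey (rng : List Int) (cell : Int → Int → Int) (init : Int) (fix : Int) :
    rng.foldl (fun c j => ((PySem.List.pyRange 0 fix 1).foldl (fun st i =>
        pvStepA st (cell j i)) (c, false, 0, false)).1) init
    = rng.foldl (fun t j => t + pvLineChokes ((PySem.List.pyRange 0 fix 1).map (fun i =>
        cell j i))) init := by
  have hf : (fun (c : Int) (j : Int) => ((PySem.List.pyRange 0 fix 1).foldl (fun st i =>
        pvStepA st (cell j i)) (c, false, 0, false)).1)
      = (fun (t : Int) (j : Int) => t + pvLineChokes ((PySem.List.pyRange 0 fix 1).map (fun i =>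
        cell j i))) := by
    funext c j
    rw [pvLineChokes_eq_SM, ← pvInnerA, List.foldl_map]
  rw [hf]

theorem find_chokepoints_eq (grid : List (List Int)) (w h_ : Int) :
    find_chokepoints grid w h_ = find_chokepoints_alt grid w h_ := by
  unfold find_chokepoints find_chokepoints_alt
  rw [pvKey (PySem.List.pyRange 0 h_ 1) (fun y x => PySem.List.pyGetD (PySem.List.pyGetD grid y []) x 0) 0 w,
      pvKey (PySem.List.pyRange 0 w 1) (fun x y => PySem.List.pyGetD (PySem.List.pyGetD grid y []) x 0) _ h_]

-- ===== VERDICT (by name: the statement is the Claim_ definition above) =====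
theorem find_chokepoints_spec : Claim_equal_find_chokepoints := by
  intro grid w h_ _ _
  unfold Spec_find_chokepoints
  exact find_chokepoints_eq grid w h_
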